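-- pv_equiv track=rewrite | github.com/pypi-data/pypi-mirror-266 | packages/cam-utils/cam_utils-0.2.5.tar.gz/cam_utils-0.2.5/cam_utils/asterisk/ami13.py | __parse_error
-- ===== SOURCE A (Python) =====
-- def __parse_error(data: str) -> dict[str, str]:
--     _list_data = data.splitlines()
--     result = {}
--     has_erro = False
--     for line in _list_data:
--         if "Response: Error" in line:
--             has_erro = True
--         if has_erro and "Message:" in line:
--             result["AMIStatus"] = "Error"
--             result["Message"] = line.split(":")[1].strip()
--
--     return result
-- ===== SOURCE B (Python) =====
-- def __parse_error(data: str) -> dict[str, str]: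
--     lines = data.splitlines()
--     error_idx = None
--     for i, line in enumerate(lines):
--         if "Response: Error" in line:
--             error_idx = i
--             break
--     if error_idx is None:
--         return {}
--     msg_line = None
--     for line in lines[error_idx:]:
--         if "Message:" in line:
--             msg_line = line
--     if msg_line is None:
--         return {}
--     return {"AMIStatus": "Error", "Message": msg_line.split(":")[1].strip()}
-- ===== Notes on version B (the rewrite author's own statement) =====
-- stated objective: alternative
-- what changed: Replaces A's single pass that threads a has_erro flag and overwrites a dict on every matching line by a two-phase decomposition: locate the first 'Response: Error' line, scan only that suffix for the last 'Message:' line, and build the result dict once at the end.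
import Mathlib
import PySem

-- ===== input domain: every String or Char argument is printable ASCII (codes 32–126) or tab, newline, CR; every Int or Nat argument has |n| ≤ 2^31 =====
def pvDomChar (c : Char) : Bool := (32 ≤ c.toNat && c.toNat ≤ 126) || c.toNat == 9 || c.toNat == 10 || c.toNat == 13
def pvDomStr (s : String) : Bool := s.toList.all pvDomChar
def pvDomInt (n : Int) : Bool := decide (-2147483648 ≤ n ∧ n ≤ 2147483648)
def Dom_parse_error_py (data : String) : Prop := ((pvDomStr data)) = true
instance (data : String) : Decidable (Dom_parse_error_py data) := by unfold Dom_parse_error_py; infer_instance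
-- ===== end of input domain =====

-- B locates the first 'Response: Error' line, then scans only the suffix for the last
-- 'Message:' line and builds the dict once at the end; same return value as A (alternative decomposition).

-- ===== PORT A =====
-- line.split(":")[1].strip(); the [1] is always in range when "Message:" is in the line
def pvMsgOf (line : String) : String :=
  PySem.Str.strip ((PySem.List.pyGet? ((PySem.Str.split? line ":").getD []) 1).getD "")

def pvStepA (st : PySem.Dict String String × Bool) (line : String) :
    PySem.Dict String String × Bool :=
  let has_erro := if PySem.Str.isIn "Response: Error" line then true else st.2
  if has_erro && PySem.Str.isIn "Message:" line then
    (((st.1.insert "AMIStatus" "Error").insert "Message" (pvMsgOf line)), has_erro)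
  else (st.1, has_erro)

def parse_error_py (data : String) : List (String × String) :=
  ((PySem.Str.splitlines data).foldl pvStepA (PySem.Dict.empty, false)).1.items

-- ===== PORT B =====
-- index of the first line containing "Response: Error"
def pvFindErrIdx : List String → Option Nat
  | [] => none
  | l :: rest =>
    if PySem.Str.isIn "Response: Error" l then some 0
    else (pvFindErrIdx rest).map (· + 1)

-- last line of the given lines containing "Message:"
def pvLastMsg (ls : List String) : Option String :=
  ls.foldl (fun acc l => if PySem.Str.isIn "Message:" l then some l else acc) none

def parse_error_py_alt (data : String) : List (String × String) :=
  let lines := PySem.Str.splitlines data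
  match pvFindErrIdx lines with
  | none => []
  | some i =>
    match pvLastMsg (lines.drop i) with
    | none => []
    | some line => [("AMIStatus", "Error"), ("Message", pvMsgOf line)]

-- ===== PRECONDITION & SPEC =====
def Spec_parse_error_py (data : String) (out : List (String × String)) : Prop := out = parse_error_py_alt data
instance (data : String) (out : List (String × String)) : Decidable (Spec_parse_error_py data out) := by unfold Spec_parse_error_py; infer_instance

-- ===== CLAIM (what is proved, stated in full; the proofs are below) =====
def Claim_equal_parse_error_py : Prop := ∀ (data : String), Dom_parse_error_py data → Spec_parse_error_py data (parse_error_py data)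

-- ===== LEMMAS AND PROOFS =====

-- the dict A's loop carries is always of this shape (empty, or the two fixed keys)
def pvD : Option String → PySem.Dict String String
  | none => PySem.Dict.empty
  | some m => PySem.Dict.mk [("AMIStatus", "Error"), ("Message", m)]

lemma pvD_insert (m0 : Option String) (m : String) :
    ((pvD m0).insert "AMIStatus" "Error").insert "Message" m = pvD (some m) := by
  cases m0 <;> rfl

-- value accumulator of A's loop
def pvFV (acc : Option String) (l : String) : Option String :=
  if PySem.Str.isIn "Message:" l then some (pvMsgOf l) else acc

lemma pvStepA_true (v0 : Option String) (l : String) :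
    pvStepA (pvD v0, true) l = (pvD (pvFV v0 l), true) := by
  unfold pvStepA pvFV
  simp only [ite_self, Bool.true_and]
  by_cases hm : PySem.Str.isIn "Message:" l = true
  · rw [if_pos hm, if_pos hm, pvD_insert]
  · rw [if_neg hm, if_neg hm]

-- A's loop from a true flag, on any list of lines
lemma pvFoldA_true (ls : List String) (v0 : Option String) :
    ls.foldl pvStepA (pvD v0, true) = (pvD (ls.foldl pvFV v0), true) := by
  induction ls generalizing v0 with
  | nil => rfl
  | cons l rest ih => rw [List.foldl_cons, List.foldl_cons, pvStepA_true, ih]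

-- A's value foldl is B's last-message foldl mapped through pvMsgOf
lemma pvFV_eq_lastMsg (ls : List String) :
    ls.foldl pvFV none = (pvLastMsg ls).map pvMsgOf := by
  unfold pvLastMsg
  suffices h : ∀ (o : Option String),
      ls.foldl pvFV (o.map pvMsgOf)
        = (ls.foldl (fun acc l => if PySem.Str.isIn "Message:" l then some l else acc) o).map pvMsgOf by
    exact h none
  induction ls with
  | nil => intro o; rfl
  | cons l rest ih =>
    intro o
    rw [List.foldl_cons, List.foldl_cons]
    simp only [pvFV] at ih ⊢
    by_cases hm : PySem.Str.isIn "Message:" l = true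
    · rw [if_pos hm, if_pos hm]
      have h2 := ih (some l)
      simp only [Option.map_some] at h2
      exact h2
    · rw [if_neg hm, if_neg hm]
      exact ih o

-- main loop lemma: A's fold from the initial state, against B's two phases
lemma pvMain (ls : List String) :
    (ls.foldl pvStepA (PySem.Dict.empty, false)).1.items
      = match pvFindErrIdx ls with
        | none => []
        | some i =>
          match pvLastMsg (ls.drop i) with
          | none => []
          | some line => [("AMIStatus", "Error"), ("Message", pvMsgOf line)] := by
  induction ls with
  | nil => rfl
  | cons l rest ih =>
    by_cases h : PySem.Str.isIn "Response: Error" l = true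
    · have h1 : pvStepA (PySem.Dict.empty, false) l = (pvD (pvFV none l), true) := by
        unfold pvStepA pvFV
        rw [if_pos h]
        simp only [Bool.true_and]
        by_cases hm : PySem.Str.isIn "Message:" l = true
        · rw [if_pos hm, if_pos hm,
            show (PySem.Dict.empty : PySem.Dict String String) = pvD none from rfl, pvD_insert]
        · rw [if_neg hm, if_neg hm]; rfl
      have hidx : pvFindErrIdx (l :: rest) = some 0 := by
        simp only [pvFindErrIdx]; rw [if_pos h]
      rw [List.foldl_cons, h1, show pvFV none l = List.foldl pvFV none [l] from rfl]
      rw [pvFoldA_true, hidx]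
      have hfold : List.foldl pvFV (List.foldl pvFV none [l]) rest
          = List.foldl pvFV none (l :: rest) := rfl
      rw [hfold, pvFV_eq_lastMsg]
      show (pvD ((pvLastMsg (l :: rest)).map pvMsgOf)).items
          = match pvLastMsg (l :: rest) with
            | none => []
            | some line => [("AMIStatus", "Error"), ("Message", pvMsgOf line)]
      cases pvLastMsg (l :: rest) with
      | none => rfl
      | some m => rfl
    · have h1 : pvStepA (PySem.Dict.empty, false) l = (PySem.Dict.empty, false) := by
        unfold pvStepA
        rw [if_neg h]
        simp only [Bool.false_and, if_neg (Bool.false_ne_true)]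
      have hidx : pvFindErrIdx (l :: rest) = (pvFindErrIdx rest).map (· + 1) := by
        simp only [pvFindErrIdx]; rw [if_neg h]
      rw [List.foldl_cons, h1, ih, hidx]
      cases hr : pvFindErrIdx rest with
      | none => rfl
      | some i => simp only [Option.map_some, List.drop_succ_cons]

-- ===== VERDICT (by name: the statement is the Claim_ definition above) =====
theorem parse_error_py_spec : Claim_equal_parse_error_py := by
  intro data _
  unfold Spec_parse_error_py parse_error_py parse_error_py_alt
  exact pvMain (PySem.Str.splitlines data)
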